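-- pv_equiv track=rewrite | github.com/MrGarrido/LLM_Negotiations | Python_Script_LLM_Negotiators/Negotiation_LLM_V4.5.py | pareto_efficient_offer
-- ===== SOURCE A (Python) =====
-- greedy_design_choice=1 # Bot will only accept offers that yield a profit ** higher or equal to the maximum (1) / MINIMUM (0) profit in the pareto efficient frontier.
--
-- def pareto_efficient_offer(constrain_of_user, constrain_bot, bot_role):
--
--     # Define the range of prices in Euros
--     prices = list(range(1, 13))  # This creates a list from 1€ to 12€
--
--     # Define the range of quality ratings
--     qualities = list(range(5))  # This creates a list from 0 to 4
--
--     # Create a list of tuples where each tuple is a combination of price and quality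
--     price_quality_combinations = [(price, quality) for price in prices for quality in qualities]
--
--     # Calculate supplier and buyer profits for each price-quality combination
--     supplier_profits = {}
--     buyer_profits = {}
--     for price, quality in price_quality_combinations:
--         if bot_role=='buyer':
--             profit_buyer = constrain_bot - price + quality
--             profit_supplier = price - constrain_of_user - quality
--         else:
--             profit_buyer = constrain_of_user - price + quality
--             profit_supplier = price - constrain_bot - quality
--
--         buyer_profits[(price, quality)] = profit_buyer
--         supplier_profits[(price, quality)] = profit_supplier
--
--     # Find Pareto Efficient Combinations
--     pareto_efficient_combinations_with_profit = []
--     dictionary_of_efficient_offers ={}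
--     dictionary_of_efficient_offers_for_BOT={}
--
--     # Iterate through each combination to evaluate efficiency
--     for combination in price_quality_combinations:
--         price, quality = combination
--         supplier_profit = supplier_profits[combination]
--         buyer_profit = buyer_profits[combination]
--
--         # Calculate collective profit and absolute difference
--         collective_profit = supplier_profit + buyer_profit
--         abs_difference = abs(supplier_profit - buyer_profit)
--
--         # Check if the combination is Pareto efficient
--         is_pareto_efficient = True
--         for other_combination in price_quality_combinations:
--             if other_combination == combination:
--                 continue
--             other_supplier_profit = supplier_profits[other_combination]
--             other_buyer_profit = buyer_profits[other_combination]
--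
--             other_collective_profit = other_supplier_profit + other_buyer_profit
--             other_abs_difference = abs(other_supplier_profit - other_buyer_profit)
--
--             # Pareto efficiency condition: no other combination should be better in both objectives
--             if (other_collective_profit > collective_profit and other_abs_difference <= abs_difference) or \
--             (other_collective_profit >= collective_profit and other_abs_difference < abs_difference):
--                 is_pareto_efficient = False
--                 break
--         if is_pareto_efficient:
--             pareto_efficient_combinations_with_profit.append((price, quality, supplier_profit, buyer_profit))
--             dictionary_of_efficient_offers[(price, quality)] = (supplier_profit, buyer_profit)
--             if bot_role=='buyer':
--                 dictionary_of_efficient_offers_for_BOT[(price, quality)] = (buyer_profit)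
--             else:
--                 dictionary_of_efficient_offers_for_BOT[(price, quality)] = (supplier_profit)
--
--     if dictionary_of_efficient_offers:
--         max_value = max(dictionary_of_efficient_offers_for_BOT.values())
--         max_keys = [key for key, value in dictionary_of_efficient_offers_for_BOT.items() if value == max_value]
--         offers_string = ' | '.join([f"Price of {price}€ and quality of {quality}" for price, quality in max_keys])
--         if greedy_design_choice==1:
--             greedyy=max(dictionary_of_efficient_offers_for_BOT.values())
--         else:
--             greedyy=min(dictionary_of_efficient_offers_for_BOT.values())
--         return (greedyy,offers_string)
-- ===== SOURCE B (Python) =====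
-- def pareto_efficient_offer(constrain_of_user, constrain_bot, bot_role):
--     # Collective profit (supplier + buyer) is the same constant for every
--     # price/quality combination, so the Pareto frontier is exactly the set of
--     # combinations minimizing the absolute profit gap |supplier - buyer|,
--     # which equals |C - 2*(price - quality)| with C = constrain_of_user + constrain_bot.
--     combos = [(p, q) for p in range(1, 13) for q in range(5)]
--     if bot_role == 'buyer':
--         def bot(p, q):
--             return constrain_bot - p + q
--     else:
--         def bot(p, q):
--             return p - constrain_bot - q
--     C = constrain_of_user + constrain_bot
--     gaps = [abs(C - 2 * (p - q)) for p, q in combos]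
--     min_gap = min(gaps)
--     best = max(bot(p, q) for (p, q), g in zip(combos, gaps) if g == min_gap)
--     keys = [(p, q) for (p, q), g in zip(combos, gaps)
--             if g == min_gap and bot(p, q) == best]
--     return (best, ' | '.join(f"Price of {p}€ and quality of {q}" for p, q in keys))
-- ===== Notes on version B (the rewrite author's own statement) =====
-- stated objective: faster
-- what changed: A's O(n^2) pairwise Pareto-dominance scan over the 60 price/quality combos is replaced by the observation that collective profit (supplier+buyer) is the same constant for every combo, so the Pareto frontier is exactly the set of combos minimizing the absolute profit gap |supplier-buyer| = |cu+cb-2*(price-quality)|, computed in one linear pass (min of gaps, then max bot profit over the argmin set).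
import Mathlib
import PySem

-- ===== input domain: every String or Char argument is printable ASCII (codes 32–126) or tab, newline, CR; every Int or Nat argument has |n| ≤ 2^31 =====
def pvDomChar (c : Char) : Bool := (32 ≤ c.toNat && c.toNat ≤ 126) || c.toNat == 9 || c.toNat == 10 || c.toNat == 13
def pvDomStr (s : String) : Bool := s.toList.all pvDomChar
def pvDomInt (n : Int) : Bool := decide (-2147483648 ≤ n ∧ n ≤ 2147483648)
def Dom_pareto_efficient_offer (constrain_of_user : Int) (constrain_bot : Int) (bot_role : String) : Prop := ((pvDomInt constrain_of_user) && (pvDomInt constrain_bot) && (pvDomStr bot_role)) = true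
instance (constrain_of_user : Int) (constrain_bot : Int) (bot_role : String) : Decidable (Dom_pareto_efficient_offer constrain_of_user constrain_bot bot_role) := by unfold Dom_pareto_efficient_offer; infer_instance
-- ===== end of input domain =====

-- B replaces A's quadratic pairwise Pareto-dominance scan by a single-pass argmin of the
-- profit gap (collective profit is constant over all 60 offers), same return value everywhere.

-- ===== PORT A =====
-- module constant greedy_design_choice = 1
def pvGreedyDesignChoice : Int := 1

-- helper: the body of A's outer 'for combination in price_quality_combinations' loop,
-- verbatim (state = (pareto list, dict of efficient offers, dict of efficient offers for BOT))
def pvAstep (constrain_of_user : Int) (constrain_bot : Int) (bot_role : String)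
    (supplier_profits buyer_profits : PySem.Dict (Int × Int) Int)
    (price_quality_combinations : List (Int × Int))
    (st : List (Int × Int × Int × Int) × PySem.Dict (Int × Int) (Int × Int) × PySem.Dict (Int × Int) Int)
    (combination : Int × Int) :
    List (Int × Int × Int × Int) × PySem.Dict (Int × Int) (Int × Int) × PySem.Dict (Int × Int) Int :=
  -- d[combination]: the key is always present, so .get?.getD is exact
  let supplier_profit := (supplier_profits.get? combination).getD 0
  let buyer_profit := (buyer_profits.get? combination).getD 0
  let collective_profit := supplier_profit + buyer_profit
  let abs_difference := |supplier_profit - buyer_profit|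
  -- inner for-loop that only flips a flag and breaks: List.any ('continue' = false branch)
  let is_pareto_efficient : Bool :=
    !(price_quality_combinations.any fun other_combination =>
      if other_combination == combination then false
      else
        decide (((supplier_profits.get? other_combination).getD 0 + (buyer_profits.get? other_combination).getD 0 > collective_profit ∧
                 |(supplier_profits.get? other_combination).getD 0 - (buyer_profits.get? other_combination).getD 0| ≤ abs_difference) ∨
                ((supplier_profits.get? other_combination).getD 0 + (buyer_profits.get? other_combination).getD 0 ≥ collective_profit ∧
                 |(supplier_profits.get? other_combination).getD 0 - (buyer_profits.get? other_combination).getD 0| < abs_difference)))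
  if is_pareto_efficient then
    (st.1 ++ [(combination.1, combination.2, supplier_profit, buyer_profit)],
     st.2.1.insert combination (supplier_profit, buyer_profit),
     st.2.2.insert combination (if bot_role == "buyer" then buyer_profit else supplier_profit))
  else st

def pareto_efficient_offer (constrain_of_user : Int) (constrain_bot : Int) (bot_role : String) : Int × String :=
  let prices : List Int := PySem.List.pyRange 1 13 1
  let qualities : List Int := PySem.List.pyRange 0 5 1
  let price_quality_combinations : List (Int × Int) :=
    prices.flatMap fun price => qualities.map fun quality => (price, quality)
  -- first loop: the two profit dicts are filled together (one fold with a pair state)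
  let profits :=
    price_quality_combinations.foldl
      (fun (st : PySem.Dict (Int × Int) Int × PySem.Dict (Int × Int) Int) pq =>
        (st.1.insert pq
           (if bot_role == "buyer" then pq.1 - constrain_of_user - pq.2 else pq.1 - constrain_bot - pq.2),
         st.2.insert pq
           (if bot_role == "buyer" then constrain_bot - pq.1 + pq.2 else constrain_of_user - pq.1 + pq.2)))
      ((PySem.Dict.empty : PySem.Dict (Int × Int) Int), (PySem.Dict.empty : PySem.Dict (Int × Int) Int))
  let supplier_profits := profits.1
  let buyer_profits := profits.2
  -- second loop (body = pvAstep above)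
  let res :=
    price_quality_combinations.foldl
      (pvAstep constrain_of_user constrain_bot bot_role supplier_profits buyer_profits price_quality_combinations)
      (([] : List (Int × Int × Int × Int)), (PySem.Dict.empty : PySem.Dict (Int × Int) (Int × Int)), (PySem.Dict.empty : PySem.Dict (Int × Int) Int))
  if res.2.1.size ≠ 0 then
    -- max(values): the dict is nonempty here, so .getD is exact
    let max_value := (PySem.List.max? res.2.2.values (fun x => x)).getD 0
    let max_keys := (res.2.2.items.filter fun kv => kv.2 == max_value).map fun kv => kv.1
    let offers_string := PySem.Str.join " | "
      (max_keys.map fun pq => "Price of " ++ PySem.Int.toStr pq.1 ++ "€ and quality of " ++ PySem.Int.toStr pq.2)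
    let greedyy :=
      if pvGreedyDesignChoice == 1 then (PySem.List.max? res.2.2.values (fun x => x)).getD 0
      else (PySem.List.min? res.2.2.values (fun x => x)).getD 0
    (greedyy, offers_string)
  else (0, "")  -- unreachable: the Pareto set is never empty (the Python never reaches its implicit None)

-- ===== PORT B =====
def pareto_efficient_offer_alt (constrain_of_user : Int) (constrain_bot : Int) (bot_role : String) : Int × String :=
  let combos : List (Int × Int) :=
    (PySem.List.pyRange 1 13 1).flatMap fun p => (PySem.List.pyRange 0 5 1).map fun q => (p, q)
  let bot : Int → Int → Int :=
    fun p q => if bot_role == "buyer" then constrain_bot - p + q else p - constrain_bot - q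
  let C := constrain_of_user + constrain_bot
  let gaps := combos.map fun pq => |C - 2 * (pq.1 - pq.2)|
  -- min(gaps): combos is nonempty, so .getD is exact
  let min_gap := (PySem.List.min? gaps (fun x => x)).getD 0
  let best := (PySem.List.max?
    (((combos.zip gaps).filter fun x => x.2 == min_gap).map fun x => bot x.1.1 x.1.2) (fun x => x)).getD 0
  let keys := ((combos.zip gaps).filter fun x => x.2 == min_gap && bot x.1.1 x.1.2 == best).map fun x => x.1
  (best, PySem.Str.join " | "
    (keys.map fun pq => "Price of " ++ PySem.Int.toStr pq.1 ++ "€ and quality of " ++ PySem.Int.toStr pq.2))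

-- ===== PRECONDITION & SPEC =====
def Spec_pareto_efficient_offer (constrain_of_user : Int) (constrain_bot : Int) (bot_role : String) (out : Int × String) : Prop := out = pareto_efficient_offer_alt constrain_of_user constrain_bot bot_role
instance (constrain_of_user : Int) (constrain_bot : Int) (bot_role : String) (out : Int × String) : Decidable (Spec_pareto_efficient_offer constrain_of_user constrain_bot bot_role out) := by unfold Spec_pareto_efficient_offer; infer_instance

-- ===== CLAIM (what is proved, stated in full; the proofs are below) =====
def Claim_equal_pareto_efficient_offer : Prop := ∀ (constrain_of_user : Int) (constrain_bot : Int) (bot_role : String), Dom_pareto_efficient_offer constrain_of_user constrain_bot bot_role → Spec_pareto_efficient_offer constrain_of_user constrain_bot bot_role (pareto_efficient_offer constrain_of_user constrain_bot bot_role)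

-- ===== LEMMAS AND PROOFS =====

-- proof-only vocabulary
def pvCombos : List (Int × Int) :=
  (PySem.List.pyRange 1 13 1).flatMap fun p => (PySem.List.pyRange 0 5 1).map fun q => (p, q)

def pvGap (C : Int) (c : Int × Int) : Int := |C - 2 * (c.1 - c.2)|

def pvM' (C : Int) : Int :=
  (PySem.List.min? (pvCombos.map fun c => pvGap C c) (fun x => x)).getD 0

def pvSup (cu cb : Int) (b : Bool) (c : Int × Int) : Int :=
  if b then c.1 - cu - c.2 else c.1 - cb - c.2

def pvBuy (cu cb : Int) (b : Bool) (c : Int × Int) : Int :=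
  if b then cb - c.1 + c.2 else cu - c.1 + c.2

def pvBot (cb : Int) (b : Bool) (c : Int × Int) : Int :=
  if b then cb - c.1 + c.2 else c.1 - cb - c.2

def pvE (cu cb : Int) : List (Int × Int) :=
  pvCombos.filter fun c => pvGap (cu + cb) c == pvM' (cu + cb)

def pvBest (cu cb : Int) (b : Bool) : Int :=
  (PySem.List.max? ((pvE cu cb).map fun c => pvBot cb b c) (fun x => x)).getD 0

def pvStr (pq : Int × Int) : String :=
  "Price of " ++ PySem.Int.toStr pq.1 ++ "€ and quality of " ++ PySem.Int.toStr pq.2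

def pvSpine (cu cb : Int) (b : Bool) : Int × String :=
  (pvBest cu cb b,
   PySem.Str.join " | "
     ((((pvE cu cb).filter fun c => pvBot cb b c == pvBest cu cb b).map fun pq => pvStr pq)))

theorem pvCombos_nodup : pvCombos.Nodup := by decide

theorem pvCombos_ne_nil : pvCombos ≠ [] := by decide

theorem pvDict_items {ν : Type} (l : List (Int × Int)) (hl : l.Nodup) (f : Int × Int → ν) :
    (l.foldl (fun d pq => d.insert pq (f pq)) PySem.Dict.empty).items
      = l.map fun c => (c, f c) := by
  have h := PySem.Dict.items_foldl_insert_fresh l (fun a => a) f PySem.Dict.empty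
    (by intro a _; simp) (by simpa using hl)
  simpa using h

theorem pvDict_keys {ν : Type} (l : List (Int × Int)) (hl : l.Nodup) (f : Int × Int → ν) :
    (l.foldl (fun d pq => d.insert pq (f pq)) PySem.Dict.empty).keys = l := by
  simp [PySem.Dict.keys, pvDict_items l hl f, Function.comp_def]

theorem pvDict_get {ν : Type} (l : List (Int × Int)) (hl : l.Nodup) (f : Int × Int → ν)
    {c : Int × Int} (hc : c ∈ l) :
    (l.foldl (fun d pq => d.insert pq (f pq)) PySem.Dict.empty).get? c = some (f c) := by
  apply PySem.Dict.get?_of_mem_items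
  · rw [pvDict_items l hl f]
    exact List.mem_map_of_mem hc
  · rw [pvDict_keys l hl f]; exact hl

theorem pvM_spec (C : Int) :
    ∃ m, PySem.List.min? (pvCombos.map fun c => pvGap C c) (fun x => x) = some m := by
  cases h : PySem.List.min? (pvCombos.map fun c => pvGap C c) (fun x => x) with
  | none =>
      have := (PySem.List.min?_eq_none_iff _ _).mp h
      simp [pvCombos_ne_nil] at this
  | some m => exact ⟨m, rfl⟩

theorem pvCond_iff (cu cb : Int) (b : Bool) (c oc : Int × Int) :
    ((pvSup cu cb b oc + pvBuy cu cb b oc > pvSup cu cb b c + pvBuy cu cb b c ∧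
      |pvSup cu cb b oc - pvBuy cu cb b oc| ≤ |pvSup cu cb b c - pvBuy cu cb b c|) ∨
     (pvSup cu cb b oc + pvBuy cu cb b oc ≥ pvSup cu cb b c + pvBuy cu cb b c ∧
      |pvSup cu cb b oc - pvBuy cu cb b oc| < |pvSup cu cb b c - pvBuy cu cb b c|))
    ↔ pvGap (cu + cb) oc < pvGap (cu + cb) c := by
  cases b <;>
    simp only [pvSup, pvBuy, pvGap, if_true, if_false, Bool.false_eq_true, Int.abs_eq_natAbs] <;>
    omega

theorem pvEff_iff (C : Int) {c : Int × Int} (hc : c ∈ pvCombos) :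
    (!(pvCombos.any fun oc => decide (pvGap C oc < pvGap C c))) = (pvGap C c == pvM' C) := by
  obtain ⟨m, hm⟩ := pvM_spec C
  have hMv : pvM' C = m := by simp [pvM', hm]
  have hmin := PySem.List.min?_isMin hm
  obtain ⟨c0, hc0, hg0⟩ := List.mem_map.mp (PySem.List.min?_mem hm)
  rw [hMv, Bool.eq_iff_iff]
  simp only [Bool.not_eq_true', List.any_eq_false, decide_eq_true_eq, beq_iff_eq]
  constructor
  · intro h
    have h1 : m ≤ pvGap C c := hmin _ (List.mem_map_of_mem hc)
    have h2 := h c0 hc0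
    omega
  · intro h oc hoc
    have := hmin _ (List.mem_map_of_mem hoc)
    omega

theorem pvE_ne_nil (cu cb : Int) : pvE cu cb ≠ [] := by
  obtain ⟨m, hm⟩ := pvM_spec (cu + cb)
  obtain ⟨c0, hc0, hg0⟩ := List.mem_map.mp (PySem.List.min?_mem hm)
  intro h
  have hc0E : c0 ∈ pvE cu cb := by
    refine List.mem_filter.mpr ⟨hc0, ?_⟩
    simp [pvM', hm, hg0]
  rw [h] at hc0E
  simp at hc0E

theorem pvE_nodup (cu cb : Int) : (pvE cu cb).Nodup := pvCombos_nodup.filter _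

theorem pvZipSelf {α β : Type} (l : List α) (g : α → β) :
    l.zip (l.map g) = l.map fun a => (a, g a) := by
  simpa using List.zip_map' (f := id) (g := g) (l := l)

theorem pvFinal (cu cb : Int) (b : Bool) :
    (if (((pvE cu cb).foldl (fun d c => d.insert c (pvSup cu cb b c, pvBuy cu cb b c))
          (PySem.Dict.empty : PySem.Dict (Int × Int) (Int × Int)))).size ≠ 0 then
       ((if pvGreedyDesignChoice == 1 then
           (PySem.List.max? ((pvE cu cb).foldl (fun d c => d.insert c (pvBot cb b c))
             (PySem.Dict.empty : PySem.Dict (Int × Int) Int)).values (fun x => x)).getD 0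
         else
           (PySem.List.min? ((pvE cu cb).foldl (fun d c => d.insert c (pvBot cb b c))
             (PySem.Dict.empty : PySem.Dict (Int × Int) Int)).values (fun x => x)).getD 0),
        PySem.Str.join " | "
          (((((pvE cu cb).foldl (fun d c => d.insert c (pvBot cb b c))
               (PySem.Dict.empty : PySem.Dict (Int × Int) Int)).items.filter fun kv =>
                 kv.2 == (PySem.List.max? ((pvE cu cb).foldl (fun d c => d.insert c (pvBot cb b c))
                   (PySem.Dict.empty : PySem.Dict (Int × Int) Int)).values (fun x => x)).getD 0).map
              fun kv => kv.1).map fun pq => pvStr pq))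
     else ((0 : Int), "")) = pvSpine cu cb b := by
  have hitemsB : ((pvE cu cb).foldl (fun d c => d.insert c (pvBot cb b c))
      (PySem.Dict.empty : PySem.Dict (Int × Int) Int)).items
      = (pvE cu cb).map (fun c => (c, pvBot cb b c)) :=
    pvDict_items _ (pvE_nodup cu cb) _
  have hitemsP : ((pvE cu cb).foldl (fun d c => d.insert c (pvSup cu cb b c, pvBuy cu cb b c))
      (PySem.Dict.empty : PySem.Dict (Int × Int) (Int × Int))).items
      = (pvE cu cb).map (fun c => (c, (pvSup cu cb b c, pvBuy cu cb b c))) :=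
    pvDict_items _ (pvE_nodup cu cb) _
  rw [if_pos]
  · have h1 : (pvGreedyDesignChoice == 1) = true := rfl
    rw [if_pos h1]
    simp only [PySem.Dict.values, hitemsB, List.map_map, List.filter_map]
    unfold pvSpine pvBest
    simp only [Function.comp_def]
  · simp only [PySem.Dict.size, hitemsP, List.length_map, ne_eq]
    have := pvE_ne_nil cu cb
    simpa [List.length_eq_zero_iff] using this

theorem pvBody (cu cb : Int) (role : String)
    (st : List (Int × Int × Int × Int) × PySem.Dict (Int × Int) (Int × Int) × PySem.Dict (Int × Int) Int) (c : Int × Int) (hc : c ∈ pvCombos) :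
    pvAstep cu cb role (List.foldl (fun (d : PySem.Dict (Int × Int) Int) pq => d.insert pq (if role == "buyer" then pq.1 - cu - pq.2 else pq.1 - cb - pq.2)) PySem.Dict.empty pvCombos) (List.foldl (fun (d : PySem.Dict (Int × Int) Int) pq => d.insert pq (if role == "buyer" then cb - pq.1 + pq.2 else cu - pq.1 + pq.2)) PySem.Dict.empty pvCombos) pvCombos st c
    = (fun (st : List (Int × Int × Int × Int) × PySem.Dict (Int × Int) (Int × Int) × PySem.Dict (Int × Int) Int) c => if pvGap (cu + cb) c == pvM' (cu + cb) then (st.1 ++ [(c.1, c.2, pvSup cu cb (role == "buyer") c, pvBuy cu cb (role == "buyer") c)], st.2.1.insert c (pvSup cu cb (role == "buyer") c, pvBuy cu cb (role == "buyer") c), st.2.2.insert c (pvBot cb (role == "buyer") c)) else st) st c := by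
  simp only [pvAstep]
  generalize (role == "buyer") = b
  rw [pvDict_get pvCombos pvCombos_nodup (fun pq => if b then pq.1 - cu - pq.2 else pq.1 - cb - pq.2) hc,
      pvDict_get pvCombos pvCombos_nodup (fun pq => if b then cb - pq.1 + pq.2 else cu - pq.1 + pq.2) hc]
  have hany := PySem.List.any_congr_mem (l := pvCombos)
    (f := fun oc => if oc == c then false else decide (((((List.foldl (fun (d : PySem.Dict (Int × Int) Int) pq => d.insert pq (if b then pq.1 - cu - pq.2 else pq.1 - cb - pq.2)) PySem.Dict.empty pvCombos).get? oc).getD 0) + (((List.foldl (fun (d : PySem.Dict (Int × Int) Int) pq => d.insert pq (if b then cb - pq.1 + pq.2 else cu - pq.1 + pq.2)) PySem.Dict.empty pvCombos).get? oc).getD 0) > (Option.getD (some (if b then c.1 - cu - c.2 else c.1 - cb - c.2)) 0) + (Option.getD (some (if b then cb - c.1 + c.2 else cu - c.1 + c.2)) 0) ∧ |(((List.foldl (fun (d : PySem.Dict (Int × Int) Int) pq => d.insert pq (if b then pq.1 - cu - pq.2 else pq.1 - cb - pq.2)) PySem.Dict.empty pvCombos).get? oc).getD 0) - (((List.foldl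 (fun (d : PySem.Dict (Int × Int) Int) pq => d.insert pq (if b then cb - pq.1 + pq.2 else cu - pq.1 + pq.2)) PySem.Dict.empty pvCombos).get? oc).getD 0)| ≤ |(Option.getD (some (if b then c.1 - cu - c.2 else c.1 - cb - c.2)) 0) - (Option.getD (some (if b then cb - c.1 + c.2 else cu - c.1 + c.2)) 0)|) ∨ ((((List.foldl (fun (d : PySem.Dict (Int × Int) Int) pq => d.insert pq (if b then pq.1 - cu - pq.2 else pq.1 - cb - pq.2)) PySem.Dict.empty pvCombos).get? oc).getD 0) + (((List.foldl (fun (d : PySem.Dict (Int × Int) Int) pq => d.insert pq (if b then cb - pq.1 + pq.2 else cu - pq.1 + pq.2)) PySem.Dict.empty pvCombos).get? oc).getD 0) ≥ (Option.getD (some (if b then c.1 - cu - c.2 else c.1 - cb - c.2)) 0) + (Option.getD (some (if b then cb - c.1 + c.2 else cu - c.1 + c.2)) 0) ∧ |(((List.foldl (fun (d : PySem.Dict (Int × Int) Int) pq => d.insert pq (if b then pq.1 - cu - pq.2 else pq.1 - cb - pq.2)) PySem.Dict.empty pvCombos).get? oc).getD 0) - (((List.foldl (fun (d : PySem.Dict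 (Int × Int) Int) pq => d.insert pq (if b then cb - pq.1 + pq.2 else cu - pq.1 + pq.2)) PySem.Dict.empty pvCombos).get? oc).getD 0)| < |(Option.getD (some (if b then c.1 - cu - c.2 else c.1 - cb - c.2)) 0) - (Option.getD (some (if b then cb - c.1 + c.2 else cu - c.1 + c.2)) 0)|)))
    (g := fun oc => decide (pvGap (cu + cb) oc < pvGap (cu + cb) c))
    (by
      intro oc hoc
      beta_reduce
      by_cases hoceq : (oc == c) = true
      · have hocc : oc = c := by simpa using hoceq
        subst hocc
        simp
      · rw [if_neg (by simp_all)]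
        rw [pvDict_get pvCombos pvCombos_nodup (fun pq => if b then pq.1 - cu - pq.2 else pq.1 - cb - pq.2) hoc,
            pvDict_get pvCombos pvCombos_nodup (fun pq => if b then cb - pq.1 + pq.2 else cu - pq.1 + pq.2) hoc]
        rw [decide_eq_decide]
        exact pvCond_iff cu cb b c oc)
  rw [hany]
  rw [pvEff_iff (cu + cb) hc]
  cases b <;> rfl

set_option maxRecDepth 65536 in
set_option maxHeartbeats 1000000 in
theorem pvA_spine (cu cb : Int) (role : String) :
    pareto_efficient_offer cu cb role = pvSpine cu cb (role == "buyer") := by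
  dsimp only [pareto_efficient_offer]
  rw [show ((PySem.List.pyRange 1 13 1).flatMap fun price => (PySem.List.pyRange 0 5 1).map fun quality => (price, quality)) = pvCombos from rfl]
  rw [PySem.List.foldl_prod_mk
      (f := fun (d : PySem.Dict (Int × Int) Int) pq => d.insert pq (if role == "buyer" then pq.1 - cu - pq.2 else pq.1 - cb - pq.2))
      (g := fun (d : PySem.Dict (Int × Int) Int) pq => d.insert pq (if role == "buyer" then cb - pq.1 + pq.2 else cu - pq.1 + pq.2))]
  dsimp only []
  have hrw := PySem.List.foldl_congr_mem pvCombos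
    (pvAstep cu cb role (List.foldl (fun (d : PySem.Dict (Int × Int) Int) pq => d.insert pq (if role == "buyer" then pq.1 - cu - pq.2 else pq.1 - cb - pq.2)) PySem.Dict.empty pvCombos) (List.foldl (fun (d : PySem.Dict (Int × Int) Int) pq => d.insert pq (if role == "buyer" then cb - pq.1 + pq.2 else cu - pq.1 + pq.2)) PySem.Dict.empty pvCombos) pvCombos)
    (fun (st : List (Int × Int × Int × Int) × PySem.Dict (Int × Int) (Int × Int) × PySem.Dict (Int × Int) Int) c => if pvGap (cu + cb) c == pvM' (cu + cb) then (st.1 ++ [(c.1, c.2, pvSup cu cb (role == "buyer") c, pvBuy cu cb (role == "buyer") c)], st.2.1.insert c (pvSup cu cb (role == "buyer") c, pvBuy cu cb (role == "buyer") c), st.2.2.insert c (pvBot cb (role == "buyer") c)) else st)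
    (([] : List (Int × Int × Int × Int)), (PySem.Dict.empty : PySem.Dict (Int × Int) (Int × Int)), (PySem.Dict.empty : PySem.Dict (Int × Int) Int))
    (fun acc x hx => pvBody cu cb role acc x hx)
  rw [hrw]
  rw [PySem.List.foldl_if_eq_foldl_filter
      (p := fun c => pvGap (cu + cb) c == pvM' (cu + cb))
      (f := fun (st : List (Int × Int × Int × Int) × PySem.Dict (Int × Int) (Int × Int) × PySem.Dict (Int × Int) Int) c =>
        (st.1 ++ [(c.1, c.2, pvSup cu cb (role == "buyer") c, pvBuy cu cb (role == "buyer") c)],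
         st.2.1.insert c (pvSup cu cb (role == "buyer") c, pvBuy cu cb (role == "buyer") c),
         st.2.2.insert c (pvBot cb (role == "buyer") c)))]
  rw [PySem.List.foldl_prod_mk
      (f := fun (l : List (Int × Int × Int × Int)) c => l ++ [(c.1, c.2, pvSup cu cb (role == "buyer") c, pvBuy cu cb (role == "buyer") c)])
      (g := fun (t : PySem.Dict (Int × Int) (Int × Int) × PySem.Dict (Int × Int) Int) c =>
        (t.1.insert c (pvSup cu cb (role == "buyer") c, pvBuy cu cb (role == "buyer") c), t.2.insert c (pvBot cb (role == "buyer") c)))]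
  rw [PySem.List.foldl_prod_mk
      (f := fun (d : PySem.Dict (Int × Int) (Int × Int)) c => d.insert c (pvSup cu cb (role == "buyer") c, pvBuy cu cb (role == "buyer") c))
      (g := fun (d : PySem.Dict (Int × Int) Int) c => d.insert c (pvBot cb (role == "buyer") c))]
  exact pvFinal cu cb (role == "buyer")

set_option maxRecDepth 65536 in
theorem pvB_spine (cu cb : Int) (role : String) :
    pareto_efficient_offer_alt cu cb role = pvSpine cu cb (role == "buyer") := by
  simp only [pareto_efficient_offer_alt, pvSpine, pvBest, pvE, pvM', pvGap, pvBot, pvStr,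
    pvCombos, pvZipSelf, List.filter_map, List.map_map, Function.comp_def, List.filter_filter,
    Bool.and_comm]

-- ===== VERDICT (by name: the statement is the Claim_ definition above) =====
theorem pareto_efficient_offer_spec : Claim_equal_pareto_efficient_offer := by
  intro cu cb role _
  show pareto_efficient_offer cu cb role = pareto_efficient_offer_alt cu cb role
  rw [pvA_spine, pvB_spine]
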